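-- pv_equiv track=rewrite | github.com/Hemant-Jain-Author/Problem-Solving-in-Data-Structures-Algorithms-using-Python | Algorithms/2 Array Recursion/FindPath2.py | findMaxPath
-- ===== SOURCE A (Python) =====
-- def findMaxPathUtil(arr, maxCol, maxRow, currCol, currRow, value, traversed):
--     if currCol < 0 or currCol >= maxCol or currRow < 0 or currRow >= maxRow :
--         return 0
--     if traversed[currCol][currRow] == 1 or arr[currCol][currRow] != value:
--         return 0
--     traversed[currCol][currRow] = 1
--     # each call corresponding to 8 direction.
--     return 1 + findMaxPathUtil(arr, maxCol, maxRow, currCol-1, currRow-1, value, traversed) + findMaxPathUtil(arr, maxCol, maxRow, currCol-1, currRow, value, traversed) + findMaxPathUtil(arr, maxCol, maxRow, currCol-1, currRow+1, value, traversed) + findMaxPathUtil(arr, maxCol, maxRow, currCol, currRow-1, value, traversed) + findMaxPathUtil(arr, maxCol, maxRow, currCol, currRow+1, value, traversed) + findMaxPathUtil(arr, maxCol, maxRow, currCol+1, currRow-1, value, traversed) + findMaxPathUtil(arr, maxCol, maxRow, currCol+1, currRow, value, traversed) + findMaxPathUtil(arr, maxCol, maxRow, currCol+1, currRow+1, value,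 traversed)
--
-- def findMaxPath(arr, maxCol, maxRow):
--     maxVal = 0
--     traversed = [[0]*maxCol for i in range(maxRow)]
--     for i in range(maxCol):
--         for j in range(maxRow):
--             temp = findMaxPathUtil(arr, maxCol, maxRow, i, j, arr[i][j], traversed)
--             if(temp > maxVal):
--                 maxVal = temp
--     return maxVal
-- ===== SOURCE B (Python) =====
-- def findMaxPath(arr, maxCol, maxRow):
--     maxVal = 0
--     traversed = [[0]*maxRow for i in range(maxCol)]
--     for i in range(maxCol):
--         for j in range(maxRow):
--             value = arr[i][j]
--             count = 0
--             stack = [(i, j)]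
--             while stack:
--                 c, r = stack.pop()
--                 if c < 0 or c >= maxCol or r < 0 or r >= maxRow:
--                     continue
--                 if traversed[c][r] == 1 or arr[c][r] != value:
--                     continue
--                 traversed[c][r] = 1
--                 count += 1
--                 stack.extend(((c+1, r+1), (c+1, r), (c+1, r-1),
--                               (c, r+1), (c, r-1),
--                               (c-1, r+1), (c-1, r), (c-1, r-1)))
--             if count > maxVal:
--                 maxVal = count
--     return maxVal
-- ===== Notes on version B (the rewrite author's own statement) =====
-- stated objective: alternative
-- what changed: The recursive 8-direction flood fill (findMaxPathUtil) is replaced by an iterative flood fill with an explicit stack (pop a cell, skip it if out of bounds / already traversed / different value, otherwise mark, count and push its 8 neighbours), and B's visited matrix is allocated in the natural [maxCol][maxRow] orientation instead of A's transposed one; the outer double loop and max tracking stay.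
import Mathlib
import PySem

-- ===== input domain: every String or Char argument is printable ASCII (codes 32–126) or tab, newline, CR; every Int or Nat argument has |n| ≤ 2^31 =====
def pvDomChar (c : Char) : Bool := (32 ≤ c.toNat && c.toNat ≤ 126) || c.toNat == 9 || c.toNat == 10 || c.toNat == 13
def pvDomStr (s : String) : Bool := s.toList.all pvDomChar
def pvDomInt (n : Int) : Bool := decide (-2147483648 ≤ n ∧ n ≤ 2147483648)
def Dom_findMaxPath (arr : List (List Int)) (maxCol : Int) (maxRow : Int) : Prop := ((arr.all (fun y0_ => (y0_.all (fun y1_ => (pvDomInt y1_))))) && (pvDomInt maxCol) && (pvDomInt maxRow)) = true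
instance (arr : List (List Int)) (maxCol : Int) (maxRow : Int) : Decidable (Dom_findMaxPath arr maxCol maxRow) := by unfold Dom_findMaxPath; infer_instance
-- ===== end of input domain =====

-- B replaces A's 8-way recursive flood fill by an iterative flood fill over an explicit
-- stack (same outer double loop); objective: alternative (no recursion, same asymptotics).

-- ===== PORT A =====
-- grid reads arr[c][r] / traversed[c][r] happen only after the 0 ≤ c,r bounds checks, and
-- inside Pre_ the indices are then within the list bounds, so getD with .toNat is exact there.
def pvTGet (t : List (List Int)) (c r : Int) : Int := (t.getD c.toNat []).getD r.toNat 0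
-- traversed[c][r] = 1
def pvTSet (t : List (List Int)) (c r : Int) : List (List Int) :=
  t.set c.toNat ((t.getD c.toNat []).set r.toNat 1)

-- findMaxPathUtil, recursion made total with a fuel counter (a pure termination guard:
-- the recursion depth is bounded by 1 + the number of untraversed cells, so the fuel
-- passed by findMaxPath below is never exhausted inside Pre_).
def findMaxPathUtil (fuel : Nat) (arr : List (List Int)) (maxCol maxRow currCol currRow value : Int)
    (traversed : List (List Int)) : Int × List (List Int) :=
  match fuel with
  | 0 => (0, traversed)
  | fuel + 1 =>
    if currCol < 0 ∨ maxCol ≤ currCol ∨ currRow < 0 ∨ maxRow ≤ currRow then (0, traversed)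
    else if pvTGet traversed currCol currRow = 1 ∨ pvTGet arr currCol currRow ≠ value then (0, traversed)
    else
      let t0 := pvTSet traversed currCol currRow
      let p1 := findMaxPathUtil fuel arr maxCol maxRow (currCol-1) (currRow-1) value t0
      let p2 := findMaxPathUtil fuel arr maxCol maxRow (currCol-1) currRow value p1.2
      let p3 := findMaxPathUtil fuel arr maxCol maxRow (currCol-1) (currRow+1) value p2.2
      let p4 := findMaxPathUtil fuel arr maxCol maxRow currCol (currRow-1) value p3.2
      let p5 := findMaxPathUtil fuel arr maxCol maxRow currCol (currRow+1) value p4.2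
      let p6 := findMaxPathUtil fuel arr maxCol maxRow (currCol+1) (currRow-1) value p5.2
      let p7 := findMaxPathUtil fuel arr maxCol maxRow (currCol+1) currRow value p6.2
      let p8 := findMaxPathUtil fuel arr maxCol maxRow (currCol+1) (currRow+1) value p7.2
      (1 + p1.1 + p2.1 + p3.1 + p4.1 + p5.1 + p6.1 + p7.1 + p8.1, p8.2)

def findMaxPath (arr : List (List Int)) (maxCol : Int) (maxRow : Int) : Int :=
  ((PySem.List.pyRange 0 maxCol 1).foldl (fun st i =>
    (PySem.List.pyRange 0 maxRow 1).foldl (fun st2 j =>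
      let p := findMaxPathUtil (maxRow.toNat * maxCol.toNat + 1) arr maxCol maxRow i j
                 (pvTGet arr i j) st2.2
      (if p.1 > st2.1 then p.1 else st2.1, p.2)) st)
    ((0 : Int), List.replicate maxRow.toNat (List.replicate maxCol.toNat (0 : Int)))).1

-- ===== PORT B =====
-- iterative flood fill: pop a cell (head of the list = top of the stack), skip it or
-- mark + count it and push its 8 neighbours; B's visited matrix is allocated in the
-- natural [maxCol][maxRow] orientation; the fuel is a pure termination guard,
-- never exhausted inside Pre_ (iterations ≤ 1 + 9 · number of cells).
def pvFlood (fuel : Nat) (arr : List (List Int)) (maxCol maxRow value : Int)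
    (stack : List (Int × Int)) (traversed : List (List Int)) (count : Int) :
    Int × List (List Int) :=
  match fuel with
  | 0 => (count, traversed)
  | fuel + 1 =>
    match stack with
    | [] => (count, traversed)
    | (c, r) :: rest =>
      if c < 0 ∨ maxCol ≤ c ∨ r < 0 ∨ maxRow ≤ r then
        pvFlood fuel arr maxCol maxRow value rest traversed count
      else if pvTGet traversed c r = 1 ∨ pvTGet arr c r ≠ value then
        pvFlood fuel arr maxCol maxRow value rest traversed count
      else
        pvFlood fuel arr maxCol maxRow value
          ((c-1, r-1) :: (c-1, r) :: (c-1, r+1) :: (c, r-1) :: (c, r+1) ::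
            (c+1, r-1) :: (c+1, r) :: (c+1, r+1) :: rest)
          (pvTSet traversed c r) (count + 1)

def findMaxPath_alt (arr : List (List Int)) (maxCol : Int) (maxRow : Int) : Int :=
  ((PySem.List.pyRange 0 maxCol 1).foldl (fun st i =>
    (PySem.List.pyRange 0 maxRow 1).foldl (fun st2 j =>
      let p := pvFlood (9 * (maxRow.toNat * maxCol.toNat) + 2) arr maxCol maxRow
                 (pvTGet arr i j) [(i, j)] st2.2 0
      (if p.1 > st2.1 then p.1 else st2.1, p.2)) st)
    ((0 : Int), List.replicate maxCol.toNat (List.replicate maxRow.toNat (0 : Int)))).1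

-- ===== PRECONDITION & SPEC =====
-- Pre_ is exactly where the Python A returns: either a loop range is empty (result 0), or
-- the grid is square with enough rows/columns in arr; on every other input A raises
-- IndexError (A's traversed is sized [maxRow][maxCol] but indexed [col][row], so any
-- positive non-square dimensions crash once the outer loop reaches the short side).
def Pre_findMaxPath (arr : List (List Int)) (maxCol : Int) (maxRow : Int) : Prop :=
  (maxCol ≤ 0 ∨ maxRow ≤ 0) ∨
  (maxCol = maxRow ∧ maxCol.toNat ≤ arr.length ∧
    ∀ row ∈ arr.take maxCol.toNat, maxRow.toNat ≤ row.length)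
instance (arr : List (List Int)) (maxCol : Int) (maxRow : Int) : Decidable (Pre_findMaxPath arr maxCol maxRow) := by unfold Pre_findMaxPath; infer_instance

def pvWitness_findMaxPath : List (List Int) × Int × Int := ([[1, 1], [0, 1]], 2, 2)

def Spec_findMaxPath (arr : List (List Int)) (maxCol : Int) (maxRow : Int) (out : Int) : Prop := out = findMaxPath_alt arr maxCol maxRow
instance (arr : List (List Int)) (maxCol : Int) (maxRow : Int) (out : Int) : Decidable (Spec_findMaxPath arr maxCol maxRow out) := by unfold Spec_findMaxPath; infer_instance

-- ===== CLAIM (what is proved, stated in full; the proofs are below) =====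
def Claim_equal_findMaxPath : Prop := ∀ (arr : List (List Int)) (maxCol : Int) (maxRow : Int), Dom_findMaxPath arr maxCol maxRow → Pre_findMaxPath arr maxCol maxRow → Spec_findMaxPath arr maxCol maxRow (findMaxPath arr maxCol maxRow)

-- ===== LEMMAS AND PROOFS =====

-- number of not-yet-traversed cells: the termination measure of both flood fills
def pvZeros (t : List (List Int)) : Nat :=
  (t.map (fun row => row.countP (fun x => x != 1))).sum

-- the traversed matrix stays an N × N matrix
def pvShape (N : Nat) (t : List (List Int)) : Prop :=
  t.length = N ∧ ∀ row ∈ t, row.length = N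

theorem pvFoldlConst {A B : Type} (l : List B) (b : A) :
    List.foldl (fun st _ => st) b l = b := by
  induction l with
  | nil => rfl
  | cons x l ih => simpa using ih

theorem pvZeros_cons (row : List Int) (rest : List (List Int)) :
    pvZeros (row :: rest) = row.countP (fun x => x != 1) + pvZeros rest := by
  simp [pvZeros]

theorem pvCountP_set (row : List Int) (m : Nat) (hm : m < row.length) (hv : row.getD m 0 ≠ 1) :
    (row.set m 1).countP (fun x => x != 1) + 1 = row.countP (fun x => x != 1) := by
  induction row generalizing m with
  | nil => simp at hm
  | cons a l ih =>
    cases m with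
    | zero =>
      have ha : ((a : Int) != 1) = true := by simpa using hv
      simp only [List.set_cons_zero, List.countP_cons, ha, bne_self_eq_false]
      simp
    | succ m =>
      have hm' : m < l.length := by simpa using hm
      have hv' : l.getD m 0 ≠ 1 := by simpa using hv
      have := ih m hm' hv'
      simp only [List.set_cons_succ, List.countP_cons]
      omega

theorem pvZeros_set (t : List (List Int)) (n m : Nat) (hn : n < t.length)
    (hm : m < (t.getD n []).length) (hv : (t.getD n []).getD m 0 ≠ 1) :
    pvZeros (t.set n ((t.getD n []).set m 1)) + 1 = pvZeros t := by
  induction t generalizing n with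
  | nil => simp at hn
  | cons row rest ih =>
    cases n with
    | zero =>
      simp only [List.getD_cons_zero] at hm hv
      simp only [List.set_cons_zero, List.getD_cons_zero, pvZeros_cons]
      have := pvCountP_set row m hm hv
      omega
    | succ n =>
      simp only [List.getD_cons_succ] at hm hv
      have := ih n (by simpa using hn) hm hv
      simp only [List.set_cons_succ, List.getD_cons_succ, pvZeros_cons]
      omega

theorem pvShape_tset (N : Nat) (t : List (List Int)) (c r : Int) (h : pvShape N t) :
    pvShape N (pvTSet t c r) := by
  obtain ⟨hl, hrow⟩ := h
  by_cases hn : c.toNat < t.length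
  · refine ⟨by simpa [pvTSet] using hl, ?_⟩
    intro row hm
    rcases List.mem_or_eq_of_mem_set hm with h | h
    · exact hrow _ h
    · subst h
      rw [List.length_set]
      exact hrow _ (by rw [List.getD_eq_getElem _ _ hn]; exact List.getElem_mem hn)
  · rw [pvTSet, List.set_eq_of_length_le (by omega)]
    exact ⟨hl, hrow⟩

theorem pvZeros_le (N : Nat) (t : List (List Int)) (h : pvShape N t) : pvZeros t ≤ N * N := by
  obtain ⟨hl, hrow⟩ := h
  have key : ∀ (u : List (List Int)), (∀ row ∈ u, row.length = N) → pvZeros u ≤ u.length * N := by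
    intro u
    induction u with
    | nil => intro _; simp [pvZeros]
    | cons row rest ih =>
      intro hu
      rw [pvZeros_cons]
      have h1 : row.countP (fun x => x != 1) ≤ row.length := List.countP_le_length
      have h2 := ih (fun r hr => hu r (List.mem_cons_of_mem _ hr))
      have h3 := hu row List.mem_cons_self
      simp only [List.length_cons, Nat.succ_mul]
      omega
  have := key t hrow
  rw [hl] at this
  exact this

theorem pvMarkZeros (N : Nat) (t : List (List Int)) (c r : Int) (hS : pvShape N t)
    (hc1 : 0 ≤ c) (hc2 : c < (N : Int)) (hr1 : 0 ≤ r) (hr2 : r < (N : Int))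
    (hv : pvTGet t c r ≠ 1) : pvZeros (pvTSet t c r) + 1 = pvZeros t := by
  have hlen := hS.1
  have hn : c.toNat < t.length := by omega
  have hrowmem : t.getD c.toNat [] ∈ t := by
    rw [List.getD_eq_getElem _ _ hn]; exact List.getElem_mem hn
  have hrl := hS.2 _ hrowmem
  have hm : r.toNat < (t.getD c.toNat []).length := by omega
  exact pvZeros_set t c.toNat r.toNat hn hm hv

theorem pvUtil_inv (arr : List (List Int)) (maxCol maxRow value : Int) (N : Nat)
    (hC : maxCol = (N : Int)) (hR : maxRow = (N : Int)) :
    ∀ (f : Nat) (c r : Int) (t : List (List Int)), pvShape N t →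
      pvShape N (findMaxPathUtil f arr maxCol maxRow c r value t).2 ∧
      pvZeros (findMaxPathUtil f arr maxCol maxRow c r value t).2 ≤ pvZeros t := by
  subst hC hR
  intro f
  induction f with
  | zero => intro c r t hS; rw [findMaxPathUtil]; exact ⟨hS, le_refl _⟩
  | succ f ih =>
    intro c r t hS
    rw [findMaxPathUtil]
    by_cases h1 : c < 0 ∨ (N : Int) ≤ c ∨ r < 0 ∨ (N : Int) ≤ r
    · rw [if_pos h1]; exact ⟨hS, le_refl _⟩
    by_cases h2 : pvTGet t c r = 1 ∨ pvTGet arr c r ≠ value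
    · rw [if_neg h1, if_pos h2]; exact ⟨hS, le_refl _⟩
    rw [if_neg h1, if_neg h2]
    push_neg at h1 h2
    obtain ⟨hc1, hc2, hr1, hr2⟩ := h1
    obtain ⟨hv, _⟩ := h2
    have hS0 := pvShape_tset N t c r hS
    have hz0 := pvMarkZeros N t c r hS hc1 hc2 hr1 hr2 hv
    have i1 := ih (c-1) (r-1) (pvTSet t c r) hS0
    have i2 := ih (c-1) r _ i1.1
    have i3 := ih (c-1) (r+1) _ i2.1
    have i4 := ih c (r-1) _ i3.1
    have i5 := ih c (r+1) _ i4.1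
    have i6 := ih (c+1) (r-1) _ i5.1
    have i7 := ih (c+1) r _ i6.1
    have i8 := ih (c+1) (r+1) _ i7.1
    dsimp only
    exact ⟨i8.1, by omega⟩

theorem pvUtil_irrel (arr : List (List Int)) (maxCol maxRow value : Int) (N : Nat)
    (hC : maxCol = (N : Int)) (hR : maxRow = (N : Int)) :
    ∀ (f1 f2 : Nat) (c r : Int) (t : List (List Int)), pvShape N t →
      pvZeros t < f1 → pvZeros t < f2 →
      findMaxPathUtil f1 arr maxCol maxRow c r value t
        = findMaxPathUtil f2 arr maxCol maxRow c r value t := by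
  subst hC hR
  intro f1
  induction f1 with
  | zero => intro f2 c r t hS h1 h2; exact absurd h1 (Nat.not_lt_zero _)
  | succ f ih =>
    intro f2 c r t hS hf1 hf2
    obtain ⟨g, rfl⟩ : ∃ g, f2 = g + 1 := ⟨f2 - 1, by omega⟩
    by_cases h1 : c < 0 ∨ (N : Int) ≤ c ∨ r < 0 ∨ (N : Int) ≤ r
    · rw [findMaxPathUtil, findMaxPathUtil, if_pos h1, if_pos h1]
    by_cases h2 : pvTGet t c r = 1 ∨ pvTGet arr c r ≠ value
    · rw [findMaxPathUtil, findMaxPathUtil, if_neg h1, if_pos h2, if_neg h1, if_pos h2]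
    rw [findMaxPathUtil, findMaxPathUtil, if_neg h1, if_neg h2, if_neg h1, if_neg h2]
    push_neg at h1 h2
    obtain ⟨hc1, hc2, hr1, hr2⟩ := h1
    obtain ⟨hv, _⟩ := h2
    have hS0 := pvShape_tset N t c r hS
    have hz0 := pvMarkZeros N t c r hS hc1 hc2 hr1 hr2 hv
    have I1 := pvUtil_inv arr (N : Int) (N : Int) value N rfl rfl g (c-1) (r-1) (pvTSet t c r) hS0
    have I2 := pvUtil_inv arr (N : Int) (N : Int) value N rfl rfl g (c-1) r _ I1.1
    have I3 := pvUtil_inv arr (N : Int) (N : Int) value N rfl rfl g (c-1) (r+1) _ I2.1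
    have I4 := pvUtil_inv arr (N : Int) (N : Int) value N rfl rfl g c (r-1) _ I3.1
    have I5 := pvUtil_inv arr (N : Int) (N : Int) value N rfl rfl g c (r+1) _ I4.1
    have I6 := pvUtil_inv arr (N : Int) (N : Int) value N rfl rfl g (c+1) (r-1) _ I5.1
    have I7 := pvUtil_inv arr (N : Int) (N : Int) value N rfl rfl g (c+1) r _ I6.1
    have e1 := ih g (c-1) (r-1) (pvTSet t c r) hS0 (by omega) (by omega)
    have e2 := ih g (c-1) r _ I1.1 (by omega) (by omega)
    have e3 := ih g (c-1) (r+1) _ I2.1 (by omega) (by omega)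
    have e4 := ih g c (r-1) _ I3.1 (by omega) (by omega)
    have e5 := ih g c (r+1) _ I4.1 (by omega) (by omega)
    have e6 := ih g (c+1) (r-1) _ I5.1 (by omega) (by omega)
    have e7 := ih g (c+1) r _ I6.1 (by omega) (by omega)
    have e8 := ih g (c+1) (r+1) _ I7.1 (by omega) (by omega)
    dsimp only
    rw [e1, e2, e3, e4, e5, e6, e7, e8]

theorem pvFlood_nil (arr : List (List Int)) (maxCol maxRow value : Int) (f : Nat)
    (t : List (List Int)) (cnt : Int) :
    pvFlood f arr maxCol maxRow value [] t cnt = (cnt, t) := by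
  cases f <;> simp [pvFlood]

theorem pvFlood_irrel (arr : List (List Int)) (maxCol maxRow value : Int) (N : Nat)
    (hC : maxCol = (N : Int)) (hR : maxRow = (N : Int)) :
    ∀ (f1 f2 : Nat) (S : List (Int × Int)) (t : List (List Int)) (cnt : Int), pvShape N t →
      S.length + 9 * pvZeros t < f1 → S.length + 9 * pvZeros t < f2 →
      pvFlood f1 arr maxCol maxRow value S t cnt = pvFlood f2 arr maxCol maxRow value S t cnt := by
  subst hC hR
  intro f1
  induction f1 with
  | zero => intro f2 S t cnt hS h1 h2; exact absurd h1 (Nat.not_lt_zero _)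
  | succ f ih =>
    intro f2 S t cnt hS hf1 hf2
    obtain ⟨g, rfl⟩ : ∃ g, f2 = g + 1 := ⟨f2 - 1, by omega⟩
    cases S with
    | nil => rw [pvFlood_nil, pvFlood_nil]
    | cons hd rest =>
      obtain ⟨c, r⟩ := hd
      simp only [List.length_cons] at hf1 hf2
      simp only [pvFlood]
      by_cases h1 : c < 0 ∨ (N : Int) ≤ c ∨ r < 0 ∨ (N : Int) ≤ r
      · simp only [if_pos h1]
        exact ih g rest t cnt hS (by omega) (by omega)
      by_cases h2 : pvTGet t c r = 1 ∨ pvTGet arr c r ≠ value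
      · simp only [if_neg h1, if_pos h2]
        exact ih g rest t cnt hS (by omega) (by omega)
      simp only [if_neg h1, if_neg h2]
      push_neg at h1 h2
      obtain ⟨hc1, hc2, hr1, hr2⟩ := h1
      obtain ⟨hv, _⟩ := h2
      have hS0 := pvShape_tset N t c r hS
      have hz0 := pvMarkZeros N t c r hS hc1 hc2 hr1 hr2 hv
      exact ih g _ (pvTSet t c r) (cnt + 1) hS0
        (by simp only [List.length_cons]; omega) (by simp only [List.length_cons]; omega)

theorem pvSim (arr : List (List Int)) (maxCol maxRow value : Int) (N : Nat)
    (hC : maxCol = (N : Int)) (hR : maxRow = (N : Int)) :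
    ∀ (k : Nat) (c r : Int) (S : List (Int × Int)) (t : List (List Int)) (cnt : Int),
      pvShape N t → 9 * pvZeros t + S.length + 1 ≤ k →
      pvFlood (k + 1) arr maxCol maxRow value ((c, r) :: S) t cnt =
        pvFlood k arr maxCol maxRow value S
          (findMaxPathUtil (pvZeros t + 1) arr maxCol maxRow c r value t).2
          (cnt + (findMaxPathUtil (pvZeros t + 1) arr maxCol maxRow c r value t).1) := by
  subst hC hR
  intro k
  induction k using Nat.strong_induction_on with
  | _ k IH =>
  intro c r S t cnt hS hk
  simp only [pvFlood]
  rw [findMaxPathUtil]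
  by_cases h1 : c < 0 ∨ (N : Int) ≤ c ∨ r < 0 ∨ (N : Int) ≤ r
  · simp only [if_pos h1]
    rw [add_zero]
  by_cases h2 : pvTGet t c r = 1 ∨ pvTGet arr c r ≠ value
  · simp only [if_neg h1, if_pos h2]
    rw [add_zero]
  simp only [if_neg h1, if_neg h2]
  push_neg at h1 h2
  obtain ⟨hc1, hc2, hr1, hr2⟩ := h1
  obtain ⟨hv, _⟩ := h2
  have hS0 := pvShape_tset N t c r hS
  have hz0 := pvMarkZeros N t c r hS hc1 hc2 hr1 hr2 hv
  obtain ⟨m, rfl⟩ : ∃ m, k = m + 8 := ⟨k - 8, by omega⟩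
  set t0 := pvTSet t c r with ht0
  set u1 := findMaxPathUtil (pvZeros t) arr (N : Int) (N : Int) (c-1) (r-1) value t0 with hu1
  have I1 := pvUtil_inv arr (N : Int) (N : Int) value N rfl rfl (pvZeros t) (c-1) (r-1) t0 hS0
  rw [← hu1] at I1
  set u2 := findMaxPathUtil (pvZeros t) arr (N : Int) (N : Int) (c-1) r value u1.2 with hu2
  have I2 := pvUtil_inv arr (N : Int) (N : Int) value N rfl rfl (pvZeros t) (c-1) r u1.2 I1.1
  rw [← hu2] at I2
  set u3 := findMaxPathUtil (pvZeros t) arr (N : Int) (N : Int) (c-1) (r+1) value u2.2 with hu3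
  have I3 := pvUtil_inv arr (N : Int) (N : Int) value N rfl rfl (pvZeros t) (c-1) (r+1) u2.2 I2.1
  rw [← hu3] at I3
  set u4 := findMaxPathUtil (pvZeros t) arr (N : Int) (N : Int) c (r-1) value u3.2 with hu4
  have I4 := pvUtil_inv arr (N : Int) (N : Int) value N rfl rfl (pvZeros t) c (r-1) u3.2 I3.1
  rw [← hu4] at I4
  set u5 := findMaxPathUtil (pvZeros t) arr (N : Int) (N : Int) c (r+1) value u4.2 with hu5
  have I5 := pvUtil_inv arr (N : Int) (N : Int) value N rfl rfl (pvZeros t) c (r+1) u4.2 I4.1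
  rw [← hu5] at I5
  set u6 := findMaxPathUtil (pvZeros t) arr (N : Int) (N : Int) (c+1) (r-1) value u5.2 with hu6
  have I6 := pvUtil_inv arr (N : Int) (N : Int) value N rfl rfl (pvZeros t) (c+1) (r-1) u5.2 I5.1
  rw [← hu6] at I6
  set u7 := findMaxPathUtil (pvZeros t) arr (N : Int) (N : Int) (c+1) r value u6.2 with hu7
  have I7 := pvUtil_inv arr (N : Int) (N : Int) value N rfl rfl (pvZeros t) (c+1) r u6.2 I6.1
  rw [← hu7] at I7
  set u8 := findMaxPathUtil (pvZeros t) arr (N : Int) (N : Int) (c+1) (r+1) value u7.2 with hu8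
  have I8 := pvUtil_inv arr (N : Int) (N : Int) value N rfl rfl (pvZeros t) (c+1) (r+1) u7.2 I7.1
  rw [← hu8] at I8
  have e1 : pvFlood (m + 8) arr (N : Int) (N : Int) value
      ((c-1, r-1) :: (c-1, r) :: (c-1, r+1) :: (c, r-1) :: (c, r+1) ::
        (c+1, r-1) :: (c+1, r) :: (c+1, r+1) :: S) t0 (cnt + 1)
      = pvFlood (m + 7) arr (N : Int) (N : Int) value
          ((c-1, r) :: (c-1, r+1) :: (c, r-1) :: (c, r+1) ::
            (c+1, r-1) :: (c+1, r) :: (c+1, r+1) :: S) u1.2 (cnt + 1 + u1.1) := by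
    have h := IH (m + 7) (by omega) (c-1) (r-1)
      ((c-1, r) :: (c-1, r+1) :: (c, r-1) :: (c, r+1) ::
        (c+1, r-1) :: (c+1, r) :: (c+1, r+1) :: S) t0 (cnt + 1) hS0
      (by simp only [List.length_cons]; omega)
    rw [hz0, ← hu1] at h
    rw [show m + 7 + 1 = m + 8 by omega] at h
    exact h
  have e2 : pvFlood (m + 7) arr (N : Int) (N : Int) value
      ((c-1, r) :: (c-1, r+1) :: (c, r-1) :: (c, r+1) ::
        (c+1, r-1) :: (c+1, r) :: (c+1, r+1) :: S) u1.2 (cnt + 1 + u1.1)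
      = pvFlood (m + 6) arr (N : Int) (N : Int) value
          ((c-1, r+1) :: (c, r-1) :: (c, r+1) ::
            (c+1, r-1) :: (c+1, r) :: (c+1, r+1) :: S) u2.2 (cnt + 1 + u1.1 + u2.1) := by
    have h := IH (m + 6) (by omega) (c-1) r
      ((c-1, r+1) :: (c, r-1) :: (c, r+1) ::
        (c+1, r-1) :: (c+1, r) :: (c+1, r+1) :: S) u1.2 (cnt + 1 + u1.1) I1.1
      (by simp only [List.length_cons]; omega)
    rw [pvUtil_irrel arr (N : Int) (N : Int) value N rfl rfl (pvZeros u1.2 + 1) (pvZeros t)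
      (c-1) r u1.2 I1.1 (by omega) (by omega), ← hu2] at h
    rw [show m + 6 + 1 = m + 7 by omega] at h
    exact h
  have e3 : pvFlood (m + 6) arr (N : Int) (N : Int) value
      ((c-1, r+1) :: (c, r-1) :: (c, r+1) ::
        (c+1, r-1) :: (c+1, r) :: (c+1, r+1) :: S) u2.2 (cnt + 1 + u1.1 + u2.1)
      = pvFlood (m + 5) arr (N : Int) (N : Int) value
          ((c, r-1) :: (c, r+1) :: (c+1, r-1) :: (c+1, r) :: (c+1, r+1) :: S) u3.2
          (cnt + 1 + u1.1 + u2.1 + u3.1) := by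
    have h := IH (m + 5) (by omega) (c-1) (r+1)
      ((c, r-1) :: (c, r+1) :: (c+1, r-1) :: (c+1, r) :: (c+1, r+1) :: S) u2.2
      (cnt + 1 + u1.1 + u2.1) I2.1 (by simp only [List.length_cons]; omega)
    rw [pvUtil_irrel arr (N : Int) (N : Int) value N rfl rfl (pvZeros u2.2 + 1) (pvZeros t)
      (c-1) (r+1) u2.2 I2.1 (by omega) (by omega), ← hu3] at h
    rw [show m + 5 + 1 = m + 6 by omega] at h
    exact h
  have e4 : pvFlood (m + 5) arr (N : Int) (N : Int) value
      ((c, r-1) :: (c, r+1) :: (c+1, r-1) :: (c+1, r) :: (c+1, r+1) :: S) u3.2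
      (cnt + 1 + u1.1 + u2.1 + u3.1)
      = pvFlood (m + 4) arr (N : Int) (N : Int) value
          ((c, r+1) :: (c+1, r-1) :: (c+1, r) :: (c+1, r+1) :: S) u4.2
          (cnt + 1 + u1.1 + u2.1 + u3.1 + u4.1) := by
    have h := IH (m + 4) (by omega) c (r-1)
      ((c, r+1) :: (c+1, r-1) :: (c+1, r) :: (c+1, r+1) :: S) u3.2
      (cnt + 1 + u1.1 + u2.1 + u3.1) I3.1 (by simp only [List.length_cons]; omega)
    rw [pvUtil_irrel arr (N : Int) (N : Int) value N rfl rfl (pvZeros u3.2 + 1) (pvZeros t)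
      c (r-1) u3.2 I3.1 (by omega) (by omega), ← hu4] at h
    rw [show m + 4 + 1 = m + 5 by omega] at h
    exact h
  have e5 : pvFlood (m + 4) arr (N : Int) (N : Int) value
      ((c, r+1) :: (c+1, r-1) :: (c+1, r) :: (c+1, r+1) :: S) u4.2
      (cnt + 1 + u1.1 + u2.1 + u3.1 + u4.1)
      = pvFlood (m + 3) arr (N : Int) (N : Int) value
          ((c+1, r-1) :: (c+1, r) :: (c+1, r+1) :: S) u5.2
          (cnt + 1 + u1.1 + u2.1 + u3.1 + u4.1 + u5.1) := by
    have h := IH (m + 3) (by omega) c (r+1)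
      ((c+1, r-1) :: (c+1, r) :: (c+1, r+1) :: S) u4.2
      (cnt + 1 + u1.1 + u2.1 + u3.1 + u4.1) I4.1 (by simp only [List.length_cons]; omega)
    rw [pvUtil_irrel arr (N : Int) (N : Int) value N rfl rfl (pvZeros u4.2 + 1) (pvZeros t)
      c (r+1) u4.2 I4.1 (by omega) (by omega), ← hu5] at h
    rw [show m + 3 + 1 = m + 4 by omega] at h
    exact h
  have e6 : pvFlood (m + 3) arr (N : Int) (N : Int) value
      ((c+1, r-1) :: (c+1, r) :: (c+1, r+1) :: S) u5.2
      (cnt + 1 + u1.1 + u2.1 + u3.1 + u4.1 + u5.1)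
      = pvFlood (m + 2) arr (N : Int) (N : Int) value
          ((c+1, r) :: (c+1, r+1) :: S) u6.2
          (cnt + 1 + u1.1 + u2.1 + u3.1 + u4.1 + u5.1 + u6.1) := by
    have h := IH (m + 2) (by omega) (c+1) (r-1)
      ((c+1, r) :: (c+1, r+1) :: S) u5.2
      (cnt + 1 + u1.1 + u2.1 + u3.1 + u4.1 + u5.1) I5.1 (by simp only [List.length_cons]; omega)
    rw [pvUtil_irrel arr (N : Int) (N : Int) value N rfl rfl (pvZeros u5.2 + 1) (pvZeros t)
      (c+1) (r-1) u5.2 I5.1 (by omega) (by omega), ← hu6] at h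
    rw [show m + 2 + 1 = m + 3 by omega] at h
    exact h
  have e7 : pvFlood (m + 2) arr (N : Int) (N : Int) value
      ((c+1, r) :: (c+1, r+1) :: S) u6.2
      (cnt + 1 + u1.1 + u2.1 + u3.1 + u4.1 + u5.1 + u6.1)
      = pvFlood (m + 1) arr (N : Int) (N : Int) value
          ((c+1, r+1) :: S) u7.2
          (cnt + 1 + u1.1 + u2.1 + u3.1 + u4.1 + u5.1 + u6.1 + u7.1) := by
    have h := IH (m + 1) (by omega) (c+1) r
      ((c+1, r+1) :: S) u6.2
      (cnt + 1 + u1.1 + u2.1 + u3.1 + u4.1 + u5.1 + u6.1) I6.1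
      (by simp only [List.length_cons]; omega)
    rw [pvUtil_irrel arr (N : Int) (N : Int) value N rfl rfl (pvZeros u6.2 + 1) (pvZeros t)
      (c+1) r u6.2 I6.1 (by omega) (by omega), ← hu7] at h
    rw [show m + 1 + 1 = m + 2 by omega] at h
    exact h
  have e8 : pvFlood (m + 1) arr (N : Int) (N : Int) value
      ((c+1, r+1) :: S) u7.2
      (cnt + 1 + u1.1 + u2.1 + u3.1 + u4.1 + u5.1 + u6.1 + u7.1)
      = pvFlood m arr (N : Int) (N : Int) value S u8.2
          (cnt + 1 + u1.1 + u2.1 + u3.1 + u4.1 + u5.1 + u6.1 + u7.1 + u8.1) := by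
    have h := IH m (by omega) (c+1) (r+1) S u7.2
      (cnt + 1 + u1.1 + u2.1 + u3.1 + u4.1 + u5.1 + u6.1 + u7.1) I7.1 (by omega)
    rw [pvUtil_irrel arr (N : Int) (N : Int) value N rfl rfl (pvZeros u7.2 + 1) (pvZeros t)
      (c+1) (r+1) u7.2 I7.1 (by omega) (by omega), ← hu8] at h
    exact h
  rw [e1, e2, e3, e4, e5, e6, e7, e8]
  have hcnt : cnt + 1 + u1.1 + u2.1 + u3.1 + u4.1 + u5.1 + u6.1 + u7.1 + u8.1
      = cnt + (1 + u1.1 + u2.1 + u3.1 + u4.1 + u5.1 + u6.1 + u7.1 + u8.1) := by ring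
  rw [hcnt]
  exact pvFlood_irrel arr (N : Int) (N : Int) value N rfl rfl m (m + 8) S u8.2 _ I8.1
    (by omega) (by omega)

theorem pvCell (arr : List (List Int)) (maxCol maxRow : Int) (N : Nat)
    (hC : maxCol = (N : Int)) (hR : maxRow = (N : Int)) (i j value : Int)
    (t : List (List Int)) (hS : pvShape N t) :
    pvFlood (9 * (maxRow.toNat * maxCol.toNat) + 2) arr maxCol maxRow value [(i, j)] t 0 =
      findMaxPathUtil (maxRow.toNat * maxCol.toNat + 1) arr maxCol maxRow i j value t := by
  subst hC hR
  rw [Int.toNat_natCast]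
  have hz := pvZeros_le N t hS
  have hsim := pvSim arr (N : Int) (N : Int) value N rfl rfl (9 * (N * N) + 1) i j [] t 0 hS
    (by simp only [List.length_nil]; omega)
  rw [show 9 * (N * N) + 1 + 1 = 9 * (N * N) + 2 by omega] at hsim
  rw [hsim, pvFlood_nil]
  rw [pvUtil_irrel arr (N : Int) (N : Int) value N rfl rfl (pvZeros t + 1) (N * N + 1)
    i j t hS (by omega) (by omega)]
  simp

theorem pvInner (arr : List (List Int)) (maxCol maxRow : Int) (N : Nat)
    (hC : maxCol = (N : Int)) (hR : maxRow = (N : Int)) (i : Int) :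
    ∀ (lj : List Int) (st : Int × List (List Int)), pvShape N st.2 →
      (lj.foldl (fun st2 j =>
          let p := findMaxPathUtil (maxRow.toNat * maxCol.toNat + 1) arr maxCol maxRow i j
                     (pvTGet arr i j) st2.2
          (if p.1 > st2.1 then p.1 else st2.1, p.2)) st
        = lj.foldl (fun st2 j =>
          let p := pvFlood (9 * (maxRow.toNat * maxCol.toNat) + 2) arr maxCol maxRow
                     (pvTGet arr i j) [(i, j)] st2.2 0
          (if p.1 > st2.1 then p.1 else st2.1, p.2)) st)
      ∧ pvShape N (lj.foldl (fun st2 j =>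
          let p := findMaxPathUtil (maxRow.toNat * maxCol.toNat + 1) arr maxCol maxRow i j
                     (pvTGet arr i j) st2.2
          (if p.1 > st2.1 then p.1 else st2.1, p.2)) st).2 := by
  intro lj
  induction lj with
  | nil => intro st hS; exact ⟨rfl, hS⟩
  | cons j lj ih =>
    intro st hS
    simp only [List.foldl_cons]
    have hcell := pvCell arr maxCol maxRow N hC hR i j (pvTGet arr i j) st.2 hS
    have hinv := pvUtil_inv arr maxCol maxRow (pvTGet arr i j) N hC hR
      (maxRow.toNat * maxCol.toNat + 1) i j st.2 hS
    rw [hcell]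
    exact ih _ hinv.1

theorem pvOuter (arr : List (List Int)) (maxCol maxRow : Int) (N : Nat)
    (hC : maxCol = (N : Int)) (hR : maxRow = (N : Int)) :
    ∀ (li : List Int) (st : Int × List (List Int)), pvShape N st.2 →
      li.foldl (fun st i =>
        (PySem.List.pyRange 0 maxRow 1).foldl (fun st2 j =>
          let p := findMaxPathUtil (maxRow.toNat * maxCol.toNat + 1) arr maxCol maxRow i j
                     (pvTGet arr i j) st2.2
          (if p.1 > st2.1 then p.1 else st2.1, p.2)) st) st
      = li.foldl (fun st i =>
        (PySem.List.pyRange 0 maxRow 1).foldl (fun st2 j =>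
          let p := pvFlood (9 * (maxRow.toNat * maxCol.toNat) + 2) arr maxCol maxRow
                     (pvTGet arr i j) [(i, j)] st2.2 0
          (if p.1 > st2.1 then p.1 else st2.1, p.2)) st) st := by
  intro li
  induction li with
  | nil => intro st hS; rfl
  | cons i li ih =>
    intro st hS
    simp only [List.foldl_cons]
    have h := pvInner arr maxCol maxRow N hC hR i (PySem.List.pyRange 0 maxRow 1) st hS
    rw [← h.1]
    exact ih _ h.2

-- ===== VERDICT (by name: the statement is the Claim_ definition above) =====
theorem findMaxPath_spec : Claim_equal_findMaxPath := by
  unfold Claim_equal_findMaxPath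
  intro arr maxCol maxRow hDom hPre
  unfold Spec_findMaxPath
  by_cases hc0 : maxCol ≤ 0
  · unfold findMaxPath findMaxPath_alt
    rw [PySem.List.pyRange_one_eq_nil hc0]
    simp only [List.foldl_nil]
  · by_cases hr0 : maxRow ≤ 0
    · unfold findMaxPath findMaxPath_alt
      rw [PySem.List.pyRange_one_eq_nil hr0]
      simp only [List.foldl_nil]
      simp [pvFoldlConst]
    · rcases hPre with h | ⟨hEq, _, _⟩
      · rcases h with h | h
        · exact absurd h hc0
        · exact absurd h hr0
      set N := maxCol.toNat with hN
      have hC : maxCol = (N : Int) := by omega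
      have hR : maxRow = (N : Int) := by omega
      unfold findMaxPath findMaxPath_alt
      rw [hC, hR, Int.toNat_natCast]
      have hS' : pvShape N (List.replicate N (List.replicate N (0 : Int))) := by
        constructor
        · simp
        · intro row hm
          rw [List.eq_of_mem_replicate hm]
          simp
      have h := pvOuter arr (N : Int) (N : Int) N rfl rfl (PySem.List.pyRange 0 (N : Int) 1)
        ((0 : Int), List.replicate N (List.replicate N (0 : Int))) hS'
      rw [Int.toNat_natCast] at h
      exact congrArg Prod.fst h
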